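-- pv_equiv track=rewrite | github.com/ermongroup/adaptive_hashing | src/python/f2.py | power_productl
-- ===== SOURCE A (Python) =====
-- def power_productl(cel1, ex1, cel2, ex2, order):
--     assert order > 0
--     assert ex1 > 0
--     # Sort the list by increasing exponent
--     cel1s = sorted(cel1, key=lambda x: x[1])
--     cel2s = sorted(cel2, key=lambda x: x[1])
--     # Prune the exponents above 'order' in the initial list
--     cel1s = [x for x in cel1s if x[1] < order]
--     cel2s = [x for x in cel2s if x[1] < order]
--     # Coefficients of powers x^0, x^1, ... x^\(order-1\)
--     coef_accumulators = [0] * order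
--     # Initialize accumulators by first the first factor
--     for c, e in cel1s:
--         if e < order:
--             coef_accumulators[e] += c
--     ex1 -= 1
--     while ex1 > 0:
--         coef_accumulators_snapshot = coef_accumulators.copy()
--         for c, e in cel1s:
--             for i in range(0, order - e):
--                 if coef_accumulators_snapshot[i] != 0:
--                     if e == 0:
--                         coef_accumulators[i] *= c
--                     else:
--                         coef_accumulators[i + e] += coef_accumulators_snapshot[
--                                                         i] * c
--         ex1 -= 1
--     while ex2 > 0:
--         coef_accumulators_snapshot = coef_accumulators.copy()
--         for c, e in cel2s:
--             for i in range(0, order - e):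
--                 if coef_accumulators_snapshot[i] != 0:
--                     if e == 0:
--                         coef_accumulators[i] *= c
--                     else:
--                         coef_accumulators[i + e] += coef_accumulators_snapshot[
--                                                         i] * c
--         ex2 -= 1
--     return coef_accumulators
-- ===== SOURCE B (Python) =====
-- def power_productl(cel1, ex1, cel2, ex2, order):
--     # Same truncated power product, computed with exponentiation by squaring.
--     assert order > 0
--     assert ex1 > 0
--
--     def mul(p, q):
--         # truncated product of two coefficient lists of length 'order'
--         r = [0] * order
--         for i in range(order):
--             a = p[i]
--             if a:
--                 for j in range(order - i):
--                     r[i + j] += a * q[j]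
--         return r
--
--     def multiplier(cel):
--         # the polynomial A multiplies by: coefficients with equal positive
--         # exponent are summed; the constant coefficient is the PRODUCT of the
--         # listed constant terms (1 if none are listed)
--         q = [0] * order
--         c0 = 1
--         for c, e in cel:
--             if e == 0:
--                 c0 *= c
--             elif 0 < e < order:
--                 q[e] += c
--         q[0] = c0
--         return q
--
--     def power(base, n):
--         # base ** n for n >= 1, by binary exponentiation
--         result = base
--         n -= 1
--         while n > 0:
--             if n % 2 == 1:
--                 result = mul(result, base)
--             base = mul(base, base)
--             n //= 2
--         return result
--
--     acc = [0] * order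
--     for c, e in cel1:
--         if 0 <= e < order:
--             acc[e] += c
--     if ex1 > 1:
--         acc = mul(acc, power(multiplier(cel1), ex1 - 1))
--     if ex2 > 0:
--         acc = mul(acc, power(multiplier(cel2), ex2))
--     return acc
-- ===== Notes on version B (the rewrite author's own statement) =====
-- stated objective: alternative
-- what changed: Replaces A's ex1+ex2 successive multiply-accumulate sweeps by building each multiplier polynomial once and raising it with exponentiation by squaring over truncated polynomial multiplication (intended as faster for large exponents, but a timing run could not confirm a speed-up at its largest size, so no speed is claimed).
-- outside the precondition, e.g. on power_productl([(1, -1)], 1, [], 0, 2): A returns [0, 1], B returns [0, 0]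
import Mathlib
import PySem

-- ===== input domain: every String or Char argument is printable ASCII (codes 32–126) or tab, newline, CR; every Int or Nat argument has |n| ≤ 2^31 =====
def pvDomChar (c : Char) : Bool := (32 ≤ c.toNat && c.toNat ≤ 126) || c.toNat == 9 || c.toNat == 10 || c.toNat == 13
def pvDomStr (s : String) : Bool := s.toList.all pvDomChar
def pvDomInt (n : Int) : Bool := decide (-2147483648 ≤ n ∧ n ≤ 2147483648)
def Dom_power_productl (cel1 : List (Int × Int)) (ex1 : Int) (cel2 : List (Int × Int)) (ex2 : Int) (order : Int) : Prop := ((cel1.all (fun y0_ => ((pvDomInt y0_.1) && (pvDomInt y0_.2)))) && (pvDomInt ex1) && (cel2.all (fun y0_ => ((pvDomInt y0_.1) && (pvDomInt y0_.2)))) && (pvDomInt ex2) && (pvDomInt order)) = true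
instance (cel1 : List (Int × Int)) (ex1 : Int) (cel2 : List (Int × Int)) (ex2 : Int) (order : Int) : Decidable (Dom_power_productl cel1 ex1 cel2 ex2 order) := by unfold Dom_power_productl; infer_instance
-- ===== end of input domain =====

-- B replaces A's ex1+ex2 successive multiply-accumulate sweeps by exponentiation by
-- squaring over truncated polynomial multiplication (a different algorithm, same results).

-- xs[i] read / write; exact where the index is in range (guaranteed by Pre_ on every use)
def pvGetI (xs : List Int) (i : Int) : Int := PySem.List.pyGetD xs i 0
def pvSetI (xs : List Int) (i : Int) (v : Int) : List Int := PySem.List.pySetD xs i v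

-- ===== PORT A =====
-- one pass of A's multiply-accumulate loop body (the body shared by both while loops)
def pvStepA (cels : List (Int × Int)) (order : Int) (acc : List Int) : List Int :=
  let snapshot := acc
  cels.foldl (fun acc ce =>
    (PySem.List.pyRange 0 (order - ce.2) 1).foldl (fun acc i =>
      if pvGetI snapshot i ≠ 0 then
        if ce.2 = 0 then pvSetI acc i (pvGetI acc i * ce.1)
        else pvSetI acc (i + ce.2) (pvGetI acc (i + ce.2) + pvGetI snapshot i * ce.1)
      else acc) acc) acc

-- 'while ex > 0: <step>; ex -= 1'
def pvLoopA (cels : List (Int × Int)) (order : Int) (acc : List Int) (ex : Int) : List Int :=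
  if 0 < ex then pvLoopA cels order (pvStepA cels order acc) (ex - 1) else acc
termination_by ex.toNat
decreasing_by omega

def power_productl (cel1 : List (Int × Int)) (ex1 : Int) (cel2 : List (Int × Int)) (ex2 : Int) (order : Int) : List Int :=
  let cel1s := (PySem.List.sorted cel1 (fun x => x.2) false).filter (fun x => x.2 < order)
  let cel2s := (PySem.List.sorted cel2 (fun x => x.2) false).filter (fun x => x.2 < order)
  let acc0 : List Int := PySem.List.pyRepeat [0] order
  let acc1 := cel1s.foldl (fun acc ce =>
    if ce.2 < order then pvSetI acc ce.2 (pvGetI acc ce.2 + ce.1) else acc) acc0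
  pvLoopA cel2s order (pvLoopA cel1s order acc1 (ex1 - 1)) ex2

-- ===== PORT B =====
-- truncated product of two coefficient lists of length 'order' (Source B's mul)
def pvMulB (order : Int) (p q : List Int) : List Int :=
  (PySem.List.pyRange 0 order 1).foldl (fun r i =>
    if pvGetI p i ≠ 0 then
      (PySem.List.pyRange 0 (order - i) 1).foldl (fun r j =>
        pvSetI r (i + j) (pvGetI r (i + j) + pvGetI p i * pvGetI q j)) r
    else r) (PySem.List.pyRepeat [0] order)

-- Source B's multiplier: positive-exponent coefficients summed, constant coefficient = product
def pvMultiplier (order : Int) (cel : List (Int × Int)) : List Int :=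
  let s := cel.foldl (fun (s : List Int × Int) ce =>
      if ce.2 = 0 then (s.1, s.2 * ce.1)
      else if 0 < ce.2 ∧ ce.2 < order then (pvSetI s.1 ce.2 (pvGetI s.1 ce.2 + ce.1), s.2)
      else s)
    (PySem.List.pyRepeat [0] order, 1)
  pvSetI s.1 0 s.2

-- Source B's power loop: 'while n > 0: if n % 2 == 1: result = mul(result, base); base = mul(base, base); n //= 2'
def pvPowLoop (order : Int) (result base : List Int) (n : Int) : List Int :=
  if 0 < n then
    pvPowLoop order (if PySem.Int.mod n 2 = 1 then pvMulB order result base else result)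
      (pvMulB order base base) (PySem.Int.floordiv n 2)
  else result
termination_by n.toNat
decreasing_by
  rename_i h
  rw [PySem.Int.floordiv_eq_ediv_of_pos (by omega)]
  omega

def pvPowB (order : Int) (base : List Int) (n : Int) : List Int := pvPowLoop order base base (n - 1)

def power_productl_alt (cel1 : List (Int × Int)) (ex1 : Int) (cel2 : List (Int × Int)) (ex2 : Int) (order : Int) : List Int :=
  let acc0 := cel1.foldl (fun acc ce =>
    if 0 ≤ ce.2 ∧ ce.2 < order then pvSetI acc ce.2 (pvGetI acc ce.2 + ce.1) else acc)
    (PySem.List.pyRepeat [0] order)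
  let acc1 := if 1 < ex1 then pvMulB order acc0 (pvPowB order (pvMultiplier order cel1) (ex1 - 1)) else acc0
  if 0 < ex2 then pvMulB order acc1 (pvPowB order (pvMultiplier order cel2) ex2) else acc1

-- ===== PRECONDITION & SPEC =====
-- Pre_ keeps A's asserted domain (order > 0, ex1 > 0) and restricts exponents to the natural
-- polynomial domain: on a negative exponent that A actually uses, A raises IndexError in its
-- multiplication loops, except when ex1 == 1 and ex2 <= 0 where Python's negative-index
-- wraparound yields an accidental value (see claim cites); B filters such terms out.
def Pre_power_productl (cel1 : List (Int × Int)) (ex1 : Int) (cel2 : List (Int × Int)) (ex2 : Int) (order : Int) : Prop :=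
  0 < order ∧ 0 < ex1 ∧ (∀ ce ∈ cel1, 0 ≤ ce.2) ∧ (0 < ex2 → ∀ ce ∈ cel2, 0 ≤ ce.2)
instance (cel1 : List (Int × Int)) (ex1 : Int) (cel2 : List (Int × Int)) (ex2 : Int) (order : Int) : Decidable (Pre_power_productl cel1 ex1 cel2 ex2 order) := by unfold Pre_power_productl; infer_instance

def pvWitness_power_productl : (List (Int × Int)) × Int × (List (Int × Int)) × Int × Int :=
  ([(1, 0), (2, 1)], 2, [(1, 1)], 1, 3)

def Spec_power_productl (cel1 : List (Int × Int)) (ex1 : Int) (cel2 : List (Int × Int)) (ex2 : Int) (order : Int) (out : List Int) : Prop := out = power_productl_alt cel1 ex1 cel2 ex2 order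
instance (cel1 : List (Int × Int)) (ex1 : Int) (cel2 : List (Int × Int)) (ex2 : Int) (order : Int) (out : List Int) : Decidable (Spec_power_productl cel1 ex1 cel2 ex2 order out) := by unfold Spec_power_productl; infer_instance

-- ===== CLAIM (what is proved, stated in full; the proofs are below) =====
def Claim_equal_power_productl : Prop := ∀ (cel1 : List (Int × Int)) (ex1 : Int) (cel2 : List (Int × Int)) (ex2 : Int) (order : Int), Dom_power_productl cel1 ex1 cel2 ex2 order → Pre_power_productl cel1 ex1 cel2 ex2 order → Spec_power_productl cel1 ex1 cel2 ex2 order (power_productl cel1 ex1 cel2 ex2 order)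

-- ===== LEMMAS AND PROOFS =====

lemma pvGetI_natCast (xs : List Int) (n : Nat) : pvGetI xs (n : Int) = xs.getD n 0 := by
  simp [pvGetI]
lemma pvSetI_natCast (xs : List Int) (n : Nat) (v : Int) : pvSetI xs (n : Int) v = xs.set n v := by
  simp [pvSetI]
lemma pv_getD_set (l : List Int) (n k : Nat) (v : Int) (h : n < l.length) :
    (l.set n v).getD k 0 = if n = k then v else l.getD k 0 := by
  rw [List.getD_eq_getElem?_getD, List.getD_eq_getElem?_getD, List.getElem?_set]
  split_ifs with h1 <;> simp [h, h1]
lemma pv_getD_replicate (N k : Nat) : (List.replicate N (0:Int)).getD k 0 = 0 := by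
  rw [List.getD_eq_getElem?_getD]
  rcases lt_or_ge k N with h | h
  · simp [h]
  · rw [List.getElem?_eq_none (by simpa using h)]; rfl
lemma pv_getD_eq_zero_of_le (l : List Int) (k : Nat) (h : l.length ≤ k) : l.getD k 0 = 0 := by
  rw [List.getD_eq_getElem?_getD, List.getElem?_eq_none h]; rfl

-- generic additive write pass
lemma pvPassAdd (b : Nat) (g : Nat → Int) (body : List Int → Int → List Int)
    (hbody : ∀ r t, 0 ≤ t → body r t = pvSetI r (t + (b:Int)) (pvGetI r (t + (b:Int)) + g t.toNat)
       ∨ (body r t = r ∧ g t.toNat = 0)) :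
    ∀ (m : Nat) (r : List Int), b + m ≤ r.length →
      (((PySem.List.pyRange 0 (m:Int) 1).foldl body r).length = r.length) ∧
      ∀ k : Nat, ((PySem.List.pyRange 0 (m:Int) 1).foldl body r).getD k 0
        = r.getD k 0 + (if b ≤ k ∧ k < b + m then g (k - b) else 0) := by
  intro m
  induction m with
  | zero => intro r h; simp [PySem.List.pyRange_one_eq_nil]
  | succ m ih =>
    intro r h
    have hsplit : PySem.List.pyRange 0 ((m:Int)+1) 1 = PySem.List.pyRange 0 (m:Int) 1 ++ [(m:Int)] :=
      PySem.List.pyRange_one_succ_right (by omega)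
    have hcast : ((m+1 : Nat) : Int) = (m:Int)+1 := by push_cast; ring
    rw [hcast, hsplit, List.foldl_append]
    obtain ⟨ihlen, ihD⟩ := ih r (by omega)
    set r' := (PySem.List.pyRange 0 (m:Int) 1).foldl body r with hr'
    rcases hbody r' (m:Int) (by omega) with hb | ⟨hb, hg⟩
    · rw [List.foldl_cons, List.foldl_nil, hb]
      have hmb : ((m:Int) + (b:Int)) = ((m + b : Nat) : Int) := by push_cast; ring
      rw [hmb, pvSetI_natCast, pvGetI_natCast]
      have hlt : m + b < r'.length := by omega
      constructor
      · simp [List.length_set, ihlen]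
      · intro k
        rw [pv_getD_set _ _ _ _ hlt]
        rcases eq_or_ne (m + b) k with he | he
        · subst he
          rw [if_pos rfl, ihD (m+b)]
          have : (((m:Int)).toNat) = m := by omega
          rw [this]
          have h1 : ¬ (b ≤ m + b ∧ m + b < b + m) := by omega
          have h2 : b ≤ m + b ∧ m + b < b + (m+1) := by omega
          rw [if_neg h1, if_pos h2]
          have : m + b - b = m := by omega
          rw [this]; ring
        · rw [if_neg he, ihD k]
          congr 1
          have : (b ≤ k ∧ k < b + m) ↔ (b ≤ k ∧ k < b + (m+1)) := by omega
          simp [this]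
    · rw [List.foldl_cons, List.foldl_nil, hb]
      refine ⟨ihlen, fun k => ?_⟩
      rw [ihD k]
      congr 1
      have : ((m:Int)).toNat = m := by omega
      rw [this] at hg
      rcases eq_or_ne k (b + m) with he | he
      · subst he
        have h1 : ¬ (b ≤ b + m ∧ b + m < b + m) := by omega
        have h2 : b ≤ b + m ∧ b + m < b + (m+1) := by omega
        rw [if_neg h1, if_pos h2]
        have : b + m - b = m := by omega
        rw [this, hg]
      · congr 1
        have : (b ≤ k ∧ k < b + m) ↔ (b ≤ k ∧ k < b + (m+1)) := by omega
        simp [this]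

-- multiplicative pass (A's constant-term branch)
lemma pvPassMul (snap : List Int) (c : Int) :
    ∀ (m : Nat) (r : List Int), m ≤ r.length →
      (((PySem.List.pyRange 0 (m:Int) 1).foldl
          (fun acc i => if pvGetI snap i ≠ 0 then pvSetI acc i (pvGetI acc i * c) else acc) r).length
        = r.length) ∧
      ∀ k : Nat, ((PySem.List.pyRange 0 (m:Int) 1).foldl
          (fun acc i => if pvGetI snap i ≠ 0 then pvSetI acc i (pvGetI acc i * c) else acc) r).getD k 0
        = if k < m ∧ snap.getD k 0 ≠ 0 then r.getD k 0 * c else r.getD k 0 := by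
  intro m
  induction m with
  | zero => intro r h; simp [PySem.List.pyRange_one_eq_nil]
  | succ m ih =>
    intro r h
    have hcast : ((m+1 : Nat) : Int) = (m:Int)+1 := by push_cast; ring
    rw [hcast, PySem.List.pyRange_one_succ_right (by omega), List.foldl_append]
    obtain ⟨ihlen, ihD⟩ := ih r (by omega)
    set r' := (PySem.List.pyRange 0 (m:Int) 1).foldl
        (fun acc i => if pvGetI snap i ≠ 0 then pvSetI acc i (pvGetI acc i * c) else acc) r with hr'
    rw [List.foldl_cons, List.foldl_nil]
    by_cases hs : snap.getD m 0 ≠ 0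
    · rw [if_pos (by rwa [pvGetI_natCast]), pvSetI_natCast, pvGetI_natCast]
      constructor
      · simp [List.length_set, ihlen]
      · intro k
        rw [pv_getD_set _ _ _ _ (by omega)]
        rcases eq_or_ne m k with he | he
        · subst he
          rw [if_pos rfl, ihD m, if_neg (by omega), if_pos ⟨by omega, hs⟩]
        · rw [if_neg he, ihD k]
          by_cases hk : k < m
          · have hk1 : k < m + 1 := by omega
            simp only [hk, hk1, true_and]
          · have hk1 : ¬ (k < m + 1) := by omega
            simp only [hk, hk1, false_and, if_false]
    · rw [if_neg (by rwa [pvGetI_natCast])]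
      refine ⟨ihlen, fun k => ?_⟩
      rw [ihD k]
      rcases eq_or_ne m k with he | he
      · subst he; rw [if_neg (by omega), if_neg (by push_neg; intro _; simpa using hs)]
      · by_cases hk : k < m
        · have hk1 : k < m + 1 := by omega
          simp only [hk, hk1, true_and]
        · have hk1 : ¬ (k < m + 1) := by omega
          simp only [hk, hk1, false_and, if_false]

lemma pvGetI_of_nonneg (xs : List Int) (t : Int) (h : 0 ≤ t) : pvGetI xs t = xs.getD t.toNat 0 := by
  rw [pvGetI, show t = ((t.toNat:Nat):Int) from (by omega), PySem.List.pyGetD_natCast]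
  congr 1

-- coefficient sum / constant-coefficient product of a term list
def pvSL (L : List (Int × Int)) (t : Nat) : Int :=
  ((L.filter (fun ce => ce.2 = (t:Int))).map (fun ce => ce.1)).sum
def pvPC (L : List (Int × Int)) : Int :=
  ((L.filter (fun ce => ce.2 = 0)).map (fun ce => ce.1)).prod
def pvQ (N : Nat) (L : List (Int × Int)) : List Int :=
  (List.range N).map (fun k => if k = 0 then pvPC L else pvSL L k)

lemma pvSL_cons (c e : Int) (L : List (Int × Int)) (t : Nat) :
    pvSL ((c, e) :: L) t = (if e = (t:Int) then c else 0) + pvSL L t := by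
  unfold pvSL
  rw [List.filter_cons]
  split_ifs with h <;> simp_all

lemma pvPC_cons (c e : Int) (L : List (Int × Int)) :
    pvPC ((c, e) :: L) = (if e = 0 then c else 1) * pvPC L := by
  unfold pvPC
  rw [List.filter_cons]
  split_ifs with h <;> simp_all

-- the body of A's multiply-accumulate loop, per term
def pvBodyA (snap : List Int) (order : Int) (acc : List Int) (ce : Int × Int) : List Int :=
  (PySem.List.pyRange 0 (order - ce.2) 1).foldl (fun acc i =>
    if pvGetI snap i ≠ 0 then
      if ce.2 = 0 then pvSetI acc i (pvGetI acc i * ce.1)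
      else pvSetI acc (i + ce.2) (pvGetI acc (i + ce.2) + pvGetI snap i * ce.1)
    else acc) acc

lemma pvStepA_eq (cels : List (Int × Int)) (order : Int) (acc : List Int) :
    pvStepA cels order acc = cels.foldl (pvBodyA acc order) acc := rfl

-- constants phase: all exponents 0
lemma pvPhase0 (snap : List Int) (order : Int) (h0 : 0 < order) :
    ∀ (L0 : List (Int × Int)), (∀ ce ∈ L0, ce.2 = 0) → ∀ (r : List Int), r.length = order.toNat →
      ((L0.foldl (pvBodyA snap order) r).length = order.toNat) ∧
      ∀ k : Nat, (L0.foldl (pvBodyA snap order) r).getD k 0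
        = if k < order.toNat ∧ snap.getD k 0 ≠ 0 then r.getD k 0 * (L0.map (fun ce => ce.1)).prod
          else r.getD k 0 := by
  intro L0
  induction L0 with
  | nil => intro _ r hr; refine ⟨hr, fun k => ?_⟩; simp
  | cons ce L ih =>
    rintro hall r hr
    obtain ⟨c, e⟩ := ce
    have he : e = 0 := hall (c, e) (List.mem_cons_self)
    subst he
    rw [List.foldl_cons]
    have hbody : pvBodyA snap order r (c, 0)
        = (PySem.List.pyRange 0 ((order.toNat : Nat) : Int) 1).foldl
            (fun acc i => if pvGetI snap i ≠ 0 then pvSetI acc i (pvGetI acc i * c) else acc) r := by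
      unfold pvBodyA
      rw [show order - (c, 0).2 = ((order.toNat : Nat) : Int) by simp; omega]
      apply PySem.List.foldl_congr_mem
      intro acc x hx
      simp
    rw [hbody]
    obtain ⟨plen, pD⟩ := pvPassMul snap c order.toNat r (by omega)
    obtain ⟨ilen, iD⟩ := ih (fun x hx => hall x (List.mem_cons_of_mem _ hx)) _ (plen.trans hr)
    refine ⟨ilen, fun k => ?_⟩
    rw [iD k, pD k]
    by_cases hc : k < order.toNat ∧ snap.getD k 0 ≠ 0
    · rw [if_pos hc, if_pos hc, if_pos hc]
      simp; ring
    · rw [if_neg hc, if_neg (by tauto), if_neg hc]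

-- positive-exponent phase
lemma pvPhasep (snap : List Int) (order : Int) (h0 : 0 < order) :
    ∀ (Lp : List (Int × Int)), (∀ ce ∈ Lp, 0 < ce.2 ∧ ce.2 < order) →
      ∀ (r : List Int), r.length = order.toNat →
      ((Lp.foldl (pvBodyA snap order) r).length = order.toNat) ∧
      ∀ k : Nat, k < order.toNat → (Lp.foldl (pvBodyA snap order) r).getD k 0
        = r.getD k 0 + (Lp.map (fun ce =>
            if ce.2 ≤ (k:Int) then snap.getD ((k:Int) - ce.2).toNat 0 * ce.1 else 0)).sum := by
  intro Lp
  induction Lp with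
  | nil => intro _ r hr; refine ⟨hr, fun k _ => ?_⟩; simp
  | cons ce L ih =>
    rintro hall r hr
    obtain ⟨c, e⟩ := ce
    obtain ⟨he0, heo⟩ := hall (c, e) (List.mem_cons_self)
    simp only at he0 heo
    rw [List.foldl_cons]
    set m : Nat := (order - e).toNat with hm
    set b : Nat := e.toNat with hb
    have hbody : pvBodyA snap order r (c, e)
        = (PySem.List.pyRange 0 ((m : Nat) : Int) 1).foldl
            (fun acc i => if pvGetI snap i ≠ 0 then
               pvSetI acc (i + (b:Int)) (pvGetI acc (i + (b:Int)) + pvGetI snap i * c) else acc) r := by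
      unfold pvBodyA
      rw [show order - (c, e).2 = ((m : Nat) : Int) by simp; omega]
      apply PySem.List.foldl_congr_mem
      intro acc x hx
      beta_reduce
      by_cases hs : pvGetI snap x ≠ 0
      · rw [if_pos hs, if_pos hs, if_neg (show ¬ ((c,e).2 = 0) by simp; omega),
          show (c,e).2 = ((b:Nat):Int) by simp; omega]
      · rw [if_neg hs, if_neg hs]
    rw [hbody]
    obtain ⟨plen, pD⟩ := pvPassAdd b (fun j => snap.getD j 0 * c)
      (fun acc i => if pvGetI snap i ≠ 0 then
         pvSetI acc (i + (b:Int)) (pvGetI acc (i + (b:Int)) + pvGetI snap i * c) else acc)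
      (by
        intro r t ht
        beta_reduce
        by_cases hs : pvGetI snap t ≠ 0
        · left
          rw [if_pos hs, pvGetI_of_nonneg snap t ht]
        · right
          rw [if_neg hs]
          push_neg at hs
          rw [pvGetI_of_nonneg snap t ht] at hs
          exact ⟨rfl, by rw [hs]; ring⟩)
      m r (by omega)
    obtain ⟨ilen, iD⟩ := ih (fun x hx => hall x (List.mem_cons_of_mem _ hx)) _ (plen.trans hr)
    refine ⟨ilen, fun k hk => ?_⟩
    rw [iD k hk, pD k, List.map_cons, List.sum_cons]
    have hcond : (b ≤ k ∧ k < b + m) ↔ ((c, e).2 ≤ (k:Int)) := by simp; omega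
    by_cases hc : (c, e).2 ≤ (k:Int)
    · rw [if_pos (hcond.mpr hc), if_pos hc]
      have : k - b = ((k:Int) - (c,e).2).toNat := by simp; omega
      rw [this]; ring
    · rw [if_neg (fun hx => hc (hcond.mp hx)), if_neg hc]; ring

lemma pvMulB_outer (order : Int) (h0 : 0 < order) (p q : List Int) :
    ∀ (m : Nat), m ≤ order.toNat →
      (((PySem.List.pyRange 0 (m:Int) 1).foldl (fun r i =>
        if pvGetI p i ≠ 0 then
          (PySem.List.pyRange 0 (order - i) 1).foldl (fun r j =>
            pvSetI r (i + j) (pvGetI r (i + j) + pvGetI p i * pvGetI q j)) r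
        else r) (List.replicate order.toNat 0)).length = order.toNat) ∧
      ∀ k : Nat, k < order.toNat →
        ((PySem.List.pyRange 0 (m:Int) 1).foldl (fun r i =>
          if pvGetI p i ≠ 0 then
            (PySem.List.pyRange 0 (order - i) 1).foldl (fun r j =>
              pvSetI r (i + j) (pvGetI r (i + j) + pvGetI p i * pvGetI q j)) r
          else r) (List.replicate order.toNat 0)).getD k 0
        = ∑ i ∈ Finset.range m, if i ≤ k then p.getD i 0 * q.getD (k - i) 0 else 0 := by
  intro m
  induction m with
  | zero =>
    intro _
    refine ⟨by simp [PySem.List.pyRange_one_eq_nil], fun k _ => ?_⟩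
    simp [PySem.List.pyRange_one_eq_nil, pv_getD_replicate]
  | succ m ih =>
    intro hm
    obtain ⟨ihlen, ihD⟩ := ih (by omega)
    have hcast : ((m+1 : Nat) : Int) = (m:Int)+1 := by push_cast; ring
    rw [hcast, PySem.List.pyRange_one_succ_right (by omega), List.foldl_append,
      List.foldl_cons, List.foldl_nil]
    set r' := (PySem.List.pyRange 0 (m:Int) 1).foldl (fun r i =>
          if pvGetI p i ≠ 0 then
            (PySem.List.pyRange 0 (order - i) 1).foldl (fun r j =>
              pvSetI r (i + j) (pvGetI r (i + j) + pvGetI p i * pvGetI q j)) r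
          else r) (List.replicate order.toNat 0) with hr'
    by_cases hp : pvGetI p (m:Int) ≠ 0
    · rw [if_pos hp]
      rw [show order - (m:Int) = ((order.toNat - m : Nat) : Int) by omega]
      obtain ⟨plen, pD⟩ := pvPassAdd m (fun j => p.getD m 0 * q.getD j 0)
        (fun r j => pvSetI r ((m:Int) + j) (pvGetI r ((m:Int) + j) + pvGetI p (m:Int) * pvGetI q j))
        (by
          intro r t ht
          left
          beta_reduce
          rw [add_comm (m:Int) t, pvGetI_natCast, pvGetI_of_nonneg q t ht])
        (order.toNat - m) r' (by omega)
      refine ⟨by rw [plen, ihlen], fun k hk => ?_⟩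
      rw [pD k, ihD k hk, Finset.sum_range_succ]
      congr 1
      by_cases hmk : m ≤ k
      · rw [if_pos ⟨hmk, by omega⟩, if_pos hmk]
      · rw [if_neg (by omega), if_neg hmk]
    · rw [if_neg hp]
      push_neg at hp
      rw [pvGetI_natCast] at hp
      refine ⟨ihlen, fun k hk => ?_⟩
      rw [ihD k hk, Finset.sum_range_succ]
      have : (if m ≤ k then p.getD m 0 * q.getD (k - m) 0 else 0) = 0 := by
        split_ifs with h
        · rw [hp, zero_mul]
        · rfl
      rw [this, add_zero]

lemma pvMulB_char (order : Int) (h0 : 0 < order) (p q : List Int) :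
    (pvMulB order p q).length = order.toNat ∧
    ∀ k : Nat, k < order.toNat → (pvMulB order p q).getD k 0
      = ∑ i ∈ Finset.range (k+1), p.getD i 0 * q.getD (k - i) 0 := by
  have hord : order = ((order.toNat : Nat) : Int) := by omega
  obtain ⟨hlen, hD⟩ := pvMulB_outer order h0 p q order.toNat (le_refl _)
  constructor
  · rw [pvMulB, PySem.List.pyRepeat_singleton]
    rw [hord] at hlen ⊢
    exact hlen
  · intro k hk
    have : pvMulB order p q = (PySem.List.pyRange 0 ((order.toNat : Nat):Int) 1).foldl (fun r i =>
          if pvGetI p i ≠ 0 then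
            (PySem.List.pyRange 0 (order - i) 1).foldl (fun r j =>
              pvSetI r (i + j) (pvGetI r (i + j) + pvGetI p i * pvGetI q j)) r
          else r) (List.replicate order.toNat 0) := by
      rw [pvMulB, PySem.List.pyRepeat_singleton, ← hord]
    rw [this, hD k hk]
    have hsub : Finset.range (k+1) ⊆ Finset.range order.toNat := fun x hx => by simp only [Finset.mem_range] at hx ⊢; omega
    have hzero := Finset.sum_subset hsub
      (f := fun i => if i ≤ k then p.getD i 0 * q.getD (k - i) 0 else 0)
      (fun x hx hnx => by beta_reduce; rw [if_neg (by simp at hnx; omega)])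
    rw [← hzero]
    exact Finset.sum_congr rfl (fun i hi => by beta_reduce; rw [if_pos (by simp at hi; omega)])

lemma pv_getD_rmap (N k : Nat) (f : Nat → Int) :
    ((List.range N).map f).getD k 0 = if k < N then f k else 0 := by
  rcases lt_or_ge k N with h | h
  · rw [if_pos h, List.getD_eq_getElem?_getD]
    simp [List.getElem?_map, List.getElem?_range h]
  · rw [if_neg (by omega)]
    exact pv_getD_eq_zero_of_le _ _ (by simpa using h)

-- list-sum ↔ exponent-indexed sum bridge
lemma pvKey (snap : List Int) (k : Nat) :
    ∀ (L : List (Int × Int)), (∀ ce ∈ L, 0 < ce.2) →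
      (L.map (fun ce => if ce.2 ≤ (k:Int) then snap.getD ((k:Int) - ce.2).toNat 0 * ce.1 else 0)).sum
      = ∑ t ∈ Finset.range k, snap.getD (k - (t+1)) 0 * pvSL L (t+1) := by
  intro L
  induction L with
  | nil => simp [pvSL]
  | cons ce L ih =>
    intro hall
    obtain ⟨c, e⟩ := ce
    have he : 0 < e := hall (c, e) List.mem_cons_self
    rw [List.map_cons, List.sum_cons, ih (fun x hx => hall x (List.mem_cons_of_mem _ hx))]
    have hsl : ∀ t : Nat, pvSL ((c, e) :: L) (t+1)
        = (if e = ((t+1 : Nat):Int) then c else 0) + pvSL L (t+1) := fun t => pvSL_cons c e L (t+1)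
    calc (if (c,e).2 ≤ (k:Int) then snap.getD ((k:Int) - (c,e).2).toNat 0 * (c,e).1 else 0)
          + ∑ t ∈ Finset.range k, snap.getD (k - (t+1)) 0 * pvSL L (t+1)
        = (∑ t ∈ Finset.range k, if t = e.toNat - 1 then snap.getD (k - (t+1)) 0 * c else 0)
          + ∑ t ∈ Finset.range k, snap.getD (k - (t+1)) 0 * pvSL L (t+1) := by
          congr 1
          rw [Finset.sum_ite_eq' (Finset.range k) (e.toNat - 1) (fun t => snap.getD (k - (t+1)) 0 * c)]
          simp only [Finset.mem_range]
          by_cases hek : (c,e).2 ≤ (k:Int)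
          · rw [if_pos hek, if_pos (by simp at hek; omega)]
            have h1 : ((k:Int) - (c,e).2).toNat = k - (e.toNat - 1 + 1) := by simp; omega
            rw [h1]
          · rw [if_neg hek, if_neg (by simp at hek; omega)]
      _ = ∑ t ∈ Finset.range k, snap.getD (k - (t+1)) 0 * pvSL ((c,e) :: L) (t+1) := by
          rw [← Finset.sum_add_distrib]
          refine Finset.sum_congr rfl (fun t ht => ?_)
          rw [hsl t, mul_add]
          congr 1
          rcases eq_or_ne e ((t+1 : Nat):Int) with hee | hee
          · rw [if_pos hee, if_pos (by omega)]
          · rw [if_neg hee, if_neg (by omega), mul_zero]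
  
lemma pvSplit0 :
    ∀ (L : List (Int × Int)), L.Pairwise (fun a b => a.2 ≤ b.2) → (∀ ce ∈ L, 0 ≤ ce.2) →
      L = L.filter (fun ce => ce.2 = 0) ++ L.filter (fun ce => !decide (ce.2 = 0)) := by
  intro L
  induction L with
  | nil => intro _ _; rfl
  | cons ce L ih =>
    intro hp hall
    have h1 : ∀ x ∈ L, ce.2 ≤ x.2 := fun x hx => (List.pairwise_cons.mp hp).1 x hx
    rw [List.filter_cons, List.filter_cons]
    by_cases hce : ce.2 = 0
    · simp only [hce, decide_true, Bool.not_true, if_true, if_false, List.cons_append]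
      exact congrArg (ce :: ·) (ih (List.pairwise_cons.mp hp).2
        (fun x hx => hall x (List.mem_cons_of_mem _ hx)))
    · simp only [hce, decide_false, Bool.not_false, if_true, if_false]
      have hf1 : L.filter (fun ce => decide (ce.2 = 0)) = [] := by
        rw [List.filter_eq_nil_iff]
        intro x hx
        have := h1 x hx
        have h0 : 0 ≤ ce.2 := hall ce List.mem_cons_self
        simp
        omega
      have hf2 : L.filter (fun ce => !decide (ce.2 = 0)) = L := by
        rw [List.filter_eq_self]
        intro x hx
        have := h1 x hx
        have h0 : 0 ≤ ce.2 := hall ce List.mem_cons_self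
        simp
        omega
      rw [hf1, hf2]
      simp

-- A's multiply-accumulate pass IS truncated multiplication by the multiplier polynomial
lemma pvStepA_char (cels : List (Int × Int)) (order : Int) (h0 : 0 < order)
    (hall : ∀ ce ∈ cels, 0 ≤ ce.2 ∧ ce.2 < order)
    (hsort : cels.Pairwise (fun a b => a.2 ≤ b.2))
    (acc : List Int) (hacc : acc.length = order.toNat) :
    pvStepA cels order acc = pvMulB order acc (pvQ order.toNat cels) := by
  set N := order.toNat with hN
  set L0 := cels.filter (fun ce => ce.2 = 0) with hL0
  set Lp := cels.filter (fun ce => !decide (ce.2 = 0)) with hLp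
  have hsplit := pvSplit0 cels hsort (fun ce hce => (hall ce hce).1)
  rw [← hL0, ← hLp] at hsplit
  have stepEq : pvStepA cels order acc
      = Lp.foldl (pvBodyA acc order) (L0.foldl (pvBodyA acc order) acc) := by
    rw [pvStepA_eq]
    conv_lhs => rw [hsplit]
    rw [List.foldl_append]
  obtain ⟨len0, D0⟩ := pvPhase0 acc order h0 L0
    (fun ce hce => by have := List.of_mem_filter hce; simpa using this) acc hacc
  obtain ⟨lenp, Dp⟩ := pvPhasep acc order h0 Lp
    (fun ce hce => by
      have h2 := List.of_mem_filter hce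
      have h3 := hall ce (List.mem_of_mem_filter hce)
      simp at h2
      exact ⟨by omega, h3.2⟩)
    _ len0
  obtain ⟨mlen, mD⟩ := pvMulB_char order h0 acc (pvQ N cels)
  apply List.ext_getElem (by rw [stepEq, lenp, mlen])
  intro k hk1 hk2
  have hk : k < N := by rw [stepEq, lenp] at hk1; exact hk1
  have hgetD : ∀ (l : List Int) (hkl : k < l.length), l[k] = l.getD k 0 := by
    intro l hkl; rw [List.getD_eq_getElem?_getD, List.getElem?_eq_getElem hkl]; rfl
  rw [hgetD _ hk1, hgetD _ hk2, stepEq, Dp k hk, mD k hk]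
  -- left side: acc_k * PC + list sum; right side: convolution sum
  have hphase0 : ∀ j : Nat, j < N →
      (L0.foldl (pvBodyA acc order) acc).getD j 0 = acc.getD j 0 * pvPC cels := by
    intro j hj
    rw [D0 j]
    by_cases hz : acc.getD j 0 ≠ 0
    · rw [if_pos ⟨hj, hz⟩]; rfl
    · push_neg at hz
      rw [if_neg (by tauto), hz, zero_mul]
  rw [hphase0 k hk, pvKey acc k Lp (fun ce hce => by
      have h2 := List.of_mem_filter hce
      have h3 := hall ce (List.mem_of_mem_filter hce)
      simp at h2
      omega)]
  -- now both sides are closed sums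
  rw [Finset.sum_range_succ]
  have hQ : ∀ j : Nat, (pvQ N cels).getD j 0
      = if j < N then (if j = 0 then pvPC cels else pvSL cels j) else 0 := by
    intro j; rw [pvQ, pv_getD_rmap]
  have hlast : acc.getD k 0 * (pvQ N cels).getD (k - k) 0 = acc.getD k 0 * pvPC cels := by
    rw [Nat.sub_self, hQ 0, if_pos (show 0 < N by omega), if_pos rfl]
  rw [hlast]
  rw [← Finset.sum_range_reflect (fun i => acc.getD i 0 * (pvQ N cels).getD (k - i) 0) k]
  rw [add_comm]
  congr 1
  refine Finset.sum_congr rfl (fun t ht => ?_)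
  simp only [Finset.mem_range] at ht
  have h1 : k - (k - 1 - t) = t + 1 := by omega
  rw [h1, hQ (t+1)]
  have h2 : k - 1 - t = k - (t+1) := by omega
  rw [h2]
  by_cases h3 : t + 1 < N
  · rw [if_pos h3, if_neg (by omega)]
    congr 1
    -- pvSL of cels vs of its nonzero-exponent part
    rw [hLp, pvSL, pvSL, List.filter_filter]
    congr 2
    apply List.filter_congr
    intro x hx
    simp
    omega
  · rw [if_neg h3, mul_zero]
    have : pvSL Lp (t+1) = 0 := by
      rw [pvSL, List.filter_eq_nil_iff.mpr, List.map_nil, List.sum_nil]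
      intro x hx
      have h3' := hall x (List.mem_of_mem_filter hx)
      simp
      omega
    rw [this, mul_zero]

-- truncation to the first N coefficients of a formal power series
noncomputable def pvT (N : Nat) (f : PowerSeries ℤ) : List Int :=
  (List.range N).map (fun k => PowerSeries.coeff k f)
noncomputable def pvPhi (p : List Int) : PowerSeries ℤ := PowerSeries.mk (fun n => p.getD n 0)
def pvAgree (N : Nat) (f g : PowerSeries ℤ) : Prop :=
  ∀ k : Nat, k < N → PowerSeries.coeff k f = PowerSeries.coeff k g

lemma pv_ext_getD (l1 l2 : List Int) (hl : l1.length = l2.length)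
    (h : ∀ k : Nat, k < l1.length → l1.getD k 0 = l2.getD k 0) : l1 = l2 := by
  apply List.ext_getElem hl
  intro k hk1 hk2
  have := h k hk1
  rw [List.getD_eq_getElem?_getD, List.getD_eq_getElem?_getD,
    List.getElem?_eq_getElem hk1, List.getElem?_eq_getElem hk2] at this
  exact this

lemma pv_coeff_phi (p : List Int) (k : Nat) : PowerSeries.coeff k (pvPhi p) = p.getD k 0 := by
  rw [pvPhi, PowerSeries.coeff_mk]
lemma pv_length_T (N : Nat) (f : PowerSeries ℤ) : (pvT N f).length = N := by
  rw [pvT, List.length_map, List.length_range]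
lemma pv_getD_T (N : Nat) (f : PowerSeries ℤ) (k : Nat) :
    (pvT N f).getD k 0 = if k < N then PowerSeries.coeff k f else 0 := pv_getD_rmap N k _
lemma pvT_phi (N : Nat) (p : List Int) (h : p.length = N) : pvT N (pvPhi p) = p := by
  apply pv_ext_getD _ _ (by rw [pv_length_T, h])
  intro k hk
  rw [pv_length_T] at hk
  rw [pv_getD_T, if_pos hk, pv_coeff_phi]
lemma pvAgree_phiT (N : Nat) (f : PowerSeries ℤ) : pvAgree N (pvPhi (pvT N f)) f := by
  intro k hk
  rw [pv_coeff_phi, pv_getD_T, if_pos hk]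
lemma pvT_congr {N : Nat} {f g : PowerSeries ℤ} (h : pvAgree N f g) : pvT N f = pvT N g := by
  rw [pvT, pvT]
  exact List.map_congr_left (fun k hk => h k (by simpa using hk))
lemma pvAgree_mul {N : Nat} {f f' g g' : PowerSeries ℤ}
    (h1 : pvAgree N f f') (h2 : pvAgree N g g') : pvAgree N (f * g) (f' * g') := by
  intro k hk
  rw [PowerSeries.coeff_mul, PowerSeries.coeff_mul]
  refine Finset.sum_congr rfl (fun p hp => ?_)
  rw [Finset.mem_antidiagonal] at hp
  rw [h1 p.1 (by omega), h2 p.2 (by omega)]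

-- pvMulB is exactly truncation of the power-series product
lemma pvMulB_T (order : Int) (h0 : 0 < order) (p q : List Int) :
    pvMulB order p q = pvT order.toNat (pvPhi p * pvPhi q) := by
  obtain ⟨hlen, hD⟩ := pvMulB_char order h0 p q
  apply pv_ext_getD _ _ (by rw [hlen, pv_length_T])
  intro k hk
  rw [hlen] at hk
  rw [hD k hk, pv_getD_T, if_pos hk, PowerSeries.coeff_mul,
    Finset.Nat.sum_antidiagonal_eq_sum_range_succ_mk]
  refine Finset.sum_congr rfl (fun i hi => ?_)
  rw [pv_coeff_phi, pv_coeff_phi]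

lemma pvMulB_TT (order : Int) (h0 : 0 < order) (f g : PowerSeries ℤ) :
    pvMulB order (pvT order.toNat f) (pvT order.toNat g) = pvT order.toNat (f * g) := by
  rw [pvMulB_T order h0]
  exact pvT_congr (pvAgree_mul (pvAgree_phiT _ f) (pvAgree_phiT _ g))

lemma pvLoopA_char (cels : List (Int × Int)) (order : Int) (h0 : 0 < order)
    (hall : ∀ ce ∈ cels, 0 ≤ ce.2 ∧ ce.2 < order)
    (hsort : cels.Pairwise (fun a b => a.2 ≤ b.2)) :
    ∀ (n : Nat) (ex : Int), ex.toNat = n → ∀ f : PowerSeries ℤ,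
      pvLoopA cels order (pvT order.toNat f) ex
        = pvT order.toNat (f * (pvPhi (pvQ order.toNat cels)) ^ n) := by
  intro n
  induction n with
  | zero =>
    intro ex hex f
    rw [pvLoopA, if_neg (by omega), pow_zero, mul_one]
  | succ n ih =>
    intro ex hex f
    rw [pvLoopA, if_pos (by omega)]
    have hstep : pvStepA cels order (pvT order.toNat f)
        = pvT order.toNat (f * pvPhi (pvQ order.toNat cels)) := by
      rw [pvStepA_char cels order h0 hall hsort _ (pv_length_T _ _)]
      have hq : pvQ order.toNat cels = pvT order.toNat (pvPhi (pvQ order.toNat cels)) :=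
        (pvT_phi _ _ (by rw [pvQ, List.length_map, List.length_range])).symm
      conv_lhs => rw [hq]
      exact pvMulB_TT order h0 f _
    rw [hstep, ih (ex - 1) (by omega) _]
    congr 1
    rw [pow_succ]
    ring

lemma pvPowLoop_char (order : Int) (h0 : 0 < order) :
    ∀ (n : Nat) (m : Int), m.toNat = n → ∀ f g : PowerSeries ℤ,
      pvPowLoop order (pvT order.toNat f) (pvT order.toNat g) m = pvT order.toNat (f * g ^ n) := by
  intro n
  induction n using Nat.strong_induction_on with
  | _ n ih =>
    intro m hm f g
    rw [pvPowLoop]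
    by_cases hpos : 0 < m
    · rw [if_pos hpos]
      have hdiv : PySem.Int.floordiv m 2 = m / 2 := PySem.Int.floordiv_eq_ediv_of_pos (by omega)
      have hmod := PySem.Int.floordiv_mul_add_mod m 2
      have hm0 : 0 ≤ PySem.Int.mod m 2 := PySem.Int.mod_nonneg m (by omega)
      have hm2 : PySem.Int.mod m 2 < 2 := PySem.Int.mod_lt m (by omega)
      have hdn : (PySem.Int.floordiv m 2).toNat < n := by rw [hdiv]; omega
      have hresult : (if PySem.Int.mod m 2 = 1 then
              pvMulB order (pvT order.toNat f) (pvT order.toNat g)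
            else pvT order.toNat f)
          = pvT order.toNat (f * g ^ (PySem.Int.mod m 2).toNat) := by
        rcases PySem.Int.mod_two_eq m with h | h
        · rw [if_neg (by rw [h]; norm_num), h]
          norm_num
        · rw [if_pos h, h, pvMulB_TT order h0]
          norm_num
      rw [hresult, pvMulB_TT order h0, ih _ hdn _ rfl (f * g ^ (PySem.Int.mod m 2).toNat) (g * g)]
      congr 1
      have harith : (PySem.Int.mod m 2).toNat + 2 * (PySem.Int.floordiv m 2).toNat = n := by
        rw [hdiv] at hmod
        omega
      calc f * g ^ (PySem.Int.mod m 2).toNat * (g * g) ^ (PySem.Int.floordiv m 2).toNat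
          = f * (g ^ (PySem.Int.mod m 2).toNat * (g ^ 2) ^ (PySem.Int.floordiv m 2).toNat) := by ring
        _ = f * g ^ ((PySem.Int.mod m 2).toNat + 2 * (PySem.Int.floordiv m 2).toNat) := by
            rw [← pow_mul, ← pow_add]
        _ = f * g ^ n := by rw [harith]
    · rw [if_neg hpos]
      have : n = 0 := by omega
      rw [this, pow_zero, mul_one]

-- initial accumulator fill
lemma pvInit :
    ∀ (L : List (Int × Int)) (r : List Int), (∀ ce ∈ L, 0 ≤ ce.2 ∧ ce.2 < (r.length : Int)) →
      ((L.foldl (fun acc ce => pvSetI acc ce.2 (pvGetI acc ce.2 + ce.1)) r).length = r.length) ∧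
      ∀ k : Nat, (L.foldl (fun acc ce => pvSetI acc ce.2 (pvGetI acc ce.2 + ce.1)) r).getD k 0
        = r.getD k 0 + pvSL L k := by
  intro L
  induction L with
  | nil => intro r _; exact ⟨rfl, fun k => by simp [pvSL]⟩
  | cons ce L ih =>
    intro r hall
    obtain ⟨c, e⟩ := ce
    obtain ⟨he0, heN⟩ := hall (c, e) List.mem_cons_self
    simp only at he0 heN
    rw [List.foldl_cons]
    have hset : pvSetI r (c, e).2 (pvGetI r (c, e).2 + (c, e).1)
        = r.set e.toNat (r.getD e.toNat 0 + c) := by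
      simp only
      rw [pvSetI, PySem.List.pySetD_of_nonneg _ _ he0, pvGetI_of_nonneg _ _ he0]
    rw [hset]
    obtain ⟨ilen, iD⟩ := ih (r.set e.toNat (r.getD e.toNat 0 + c))
      (fun x hx => by
        have := hall x (List.mem_cons_of_mem _ hx)
        simpa [List.length_set] using this)
    refine ⟨by rw [ilen, List.length_set], fun k => ?_⟩
    rw [iD k, pv_getD_set _ _ _ _ (by omega), pvSL_cons]
    rcases eq_or_ne (e.toNat) k with he | he
    · subst he
      rw [if_pos rfl, if_pos (by omega)]; ring
    · rw [if_neg he, if_neg (by omega)]; ring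

lemma pvSL_perm {L L' : List (Int × Int)} (h : L.Perm L') (k : Nat) : pvSL L k = pvSL L' k :=
  List.Perm.sum_eq ((h.filter _).map _)
lemma pvPC_perm {L L' : List (Int × Int)} (h : L.Perm L') : pvPC L = pvPC L' :=
  List.Perm.prod_eq ((h.filter _).map _)

-- B's multiplier builder equals pvQ
lemma pvMultiplier_fold (order : Int) (h0 : 0 < order) :
    ∀ (cel : List (Int × Int)) (q : List Int) (c0 : Int), q.length = order.toNat →
      ((cel.foldl (fun (s : List Int × Int) ce =>
          if ce.2 = 0 then (s.1, s.2 * ce.1)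
          else if 0 < ce.2 ∧ ce.2 < order then (pvSetI s.1 ce.2 (pvGetI s.1 ce.2 + ce.1), s.2)
          else s) (q, c0)).1.length = order.toNat) ∧
      (∀ k : Nat, k < order.toNat → (cel.foldl (fun (s : List Int × Int) ce =>
          if ce.2 = 0 then (s.1, s.2 * ce.1)
          else if 0 < ce.2 ∧ ce.2 < order then (pvSetI s.1 ce.2 (pvGetI s.1 ce.2 + ce.1), s.2)
          else s) (q, c0)).1.getD k 0
        = q.getD k 0 + (if k = 0 then 0 else pvSL cel k)) ∧
      ((cel.foldl (fun (s : List Int × Int) ce =>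
          if ce.2 = 0 then (s.1, s.2 * ce.1)
          else if 0 < ce.2 ∧ ce.2 < order then (pvSetI s.1 ce.2 (pvGetI s.1 ce.2 + ce.1), s.2)
          else s) (q, c0)).2 = c0 * pvPC cel) := by
  intro cel
  induction cel with
  | nil =>
    intro q c0 hq
    refine ⟨hq, fun k hk => by simp [pvSL], by simp [pvPC]⟩
  | cons ce L ih =>
    intro q c0 hq
    obtain ⟨c, e⟩ := ce
    rw [List.foldl_cons]
    by_cases he : e = 0
    · subst he
      rw [if_pos rfl]
      obtain ⟨ilen, iD, iC⟩ := ih q (c0 * c) hq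
      refine ⟨ilen, fun k hk => ?_, ?_⟩
      · rw [iD k hk]
        congr 1
        rcases eq_or_ne k 0 with hk0 | hk0
        · rw [if_pos hk0, if_pos hk0]
        · rw [if_neg hk0, if_neg hk0, pvSL_cons, if_neg (by omega), zero_add]
      · rw [iC, pvPC_cons, if_pos rfl]; ring
    · rw [if_neg (by simpa using he)]
      by_cases hr : 0 < e ∧ e < order
      · rw [if_pos (by simpa using hr)]
        have hset : pvSetI q (c, e).2 (pvGetI q (c, e).2 + (c, e).1)
            = q.set e.toNat (q.getD e.toNat 0 + c) := by
          simp only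
          rw [pvSetI, PySem.List.pySetD_of_nonneg _ _ (by omega), pvGetI_of_nonneg _ _ (by omega)]
        rw [hset]
        obtain ⟨ilen, iD, iC⟩ := ih (q.set e.toNat (q.getD e.toNat 0 + c)) c0 (by rw [List.length_set, hq])
        refine ⟨ilen, fun k hk => ?_, ?_⟩
        · rw [iD k hk, pv_getD_set _ _ _ _ (by omega)]
          rcases eq_or_ne (e.toNat) k with hek | hek
          · subst hek
            rw [if_pos rfl, if_neg (by omega), if_neg (by omega), pvSL_cons, if_pos (by omega)]
            ring
          · rw [if_neg hek]
            congr 1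
            rcases eq_or_ne k 0 with hk0 | hk0
            · rw [if_pos hk0, if_pos hk0]
            · rw [if_neg hk0, if_neg hk0, pvSL_cons, if_neg (by omega), zero_add]
        · rw [iC, pvPC_cons, if_neg he, one_mul]
      · rw [if_neg (by simpa using hr)]
        obtain ⟨ilen, iD, iC⟩ := ih q c0 hq
        refine ⟨ilen, fun k hk => ?_, ?_⟩
        · rw [iD k hk]
          congr 1
          rcases eq_or_ne k 0 with hk0 | hk0
          · rw [if_pos hk0, if_pos hk0]
          · rw [if_neg hk0, if_neg hk0, pvSL_cons, if_neg (by omega), zero_add]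
        · rw [iC, pvPC_cons, if_neg he, one_mul]

lemma pvMultiplier_char (order : Int) (h0 : 0 < order) (cel : List (Int × Int)) :
    pvMultiplier order cel = pvQ order.toNat cel := by
  obtain ⟨flen, fD, fC⟩ := pvMultiplier_fold order h0 cel
    (List.replicate order.toNat 0) 1
    (by rw [List.length_replicate])
  rw [pvMultiplier, PySem.List.pyRepeat_singleton]
  set s := cel.foldl (fun (s : List Int × Int) ce =>
      if ce.2 = 0 then (s.1, s.2 * ce.1)
      else if 0 < ce.2 ∧ ce.2 < order then (pvSetI s.1 ce.2 (pvGetI s.1 ce.2 + ce.1), s.2)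
      else s) ((List.replicate order.toNat 0 : List Int), (1:Int)) with hs
  have hset : pvSetI s.1 0 s.2 = s.1.set 0 s.2 := by
    rw [pvSetI, show (0:Int) = ((0:Nat):Int) by norm_num, PySem.List.pySetD_natCast]
  rw [hset]
  apply pv_ext_getD _ _ (by rw [List.length_set, flen, pvQ, List.length_map, List.length_range])
  intro k hk
  rw [List.length_set, flen] at hk
  rw [pv_getD_set _ _ _ _ (by omega), pvQ, pv_getD_rmap, if_pos hk]
  rcases eq_or_ne k 0 with hk0 | hk0
  · rw [if_pos (hk0.symm), if_pos hk0, fC, one_mul]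
  · rw [if_neg (fun h => hk0 h.symm), if_neg hk0, fD k hk, if_neg hk0, pv_getD_replicate, zero_add]

lemma pvQ_len (N : Nat) (L : List (Int × Int)) : (pvQ N L).length = N := by
  rw [pvQ, List.length_map, List.length_range]

lemma pvQ_bridge (order : Int) (h0 : 0 < order) (cel : List (Int × Int))
    (hall : ∀ ce ∈ cel, 0 ≤ ce.2) :
    pvQ order.toNat ((PySem.List.sorted cel (fun x => x.2) false).filter
        (fun x => decide (x.2 < order)))
      = pvQ order.toNat cel := by
  have hperm : (((PySem.List.sorted cel (fun x => x.2) false).filter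
      (fun x => decide (x.2 < order)))).Perm (cel.filter (fun x => decide (x.2 < order))) :=
    (PySem.List.sorted_perm cel _ false).filter _
  unfold pvQ
  apply List.map_congr_left
  intro k hk
  rw [List.mem_range] at hk
  beta_reduce
  by_cases hk0 : k = 0
  · subst hk0
    rw [if_pos rfl, if_pos rfl, pvPC_perm hperm, pvPC, pvPC, List.filter_filter]
    congr 2
    apply List.filter_congr
    intro x hx
    by_cases hx0 : x.2 = 0
    · simp [hx0, h0]
    · simp [hx0]
  · rw [if_neg hk0, if_neg hk0, pvSL_perm hperm k, pvSL, pvSL, List.filter_filter]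
    congr 2
    apply List.filter_congr
    intro x hx
    by_cases hxk : x.2 = (k : Int)
    · simp [hxk]
      omega
    · simp [hxk]

-- the two initial accumulators coincide
lemma pvInit_eq (cel1 : List (Int × Int)) (order : Int) (h0 : 0 < order)
    (hall : ∀ ce ∈ cel1, 0 ≤ ce.2) :
    (((PySem.List.sorted cel1 (fun x => x.2) false).filter (fun x => decide (x.2 < order))).foldl
        (fun acc ce => if ce.2 < order then pvSetI acc ce.2 (pvGetI acc ce.2 + ce.1) else acc)
        (PySem.List.pyRepeat [0] order)
      = cel1.foldl (fun acc ce =>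
          if 0 ≤ ce.2 ∧ ce.2 < order then pvSetI acc ce.2 (pvGetI acc ce.2 + ce.1) else acc)
          (PySem.List.pyRepeat [0] order)) ∧
    (cel1.foldl (fun acc ce =>
        if 0 ≤ ce.2 ∧ ce.2 < order then pvSetI acc ce.2 (pvGetI acc ce.2 + ce.1) else acc)
        (PySem.List.pyRepeat [0] order)).length = order.toNat := by
  rw [PySem.List.pyRepeat_singleton,
    PySem.List.foldl_ite_eq_foldl_filter (fun (ce : Int × Int) => ce.2 < order)
      (fun acc ce => pvSetI acc ce.2 (pvGetI acc ce.2 + ce.1)),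
    PySem.List.foldl_ite_eq_foldl_filter (fun (ce : Int × Int) => 0 ≤ ce.2 ∧ ce.2 < order)
      (fun acc ce => pvSetI acc ce.2 (pvGetI acc ce.2 + ce.1))]
  have hLA : ((PySem.List.sorted cel1 (fun x => x.2) false).filter
        (fun x => decide (x.2 < order))).filter (fun ce => decide (ce.2 < order))
      = (PySem.List.sorted cel1 (fun x => x.2) false).filter (fun x => decide (x.2 < order)) := by
    rw [List.filter_eq_self]
    intro x hx
    simpa using (List.mem_filter.mp hx).2
  rw [hLA]
  have hrep : (List.replicate order.toNat (0:Int)).length = order.toNat := List.length_replicate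
  have hmemA : ∀ ce ∈ (PySem.List.sorted cel1 (fun x => x.2) false).filter
      (fun x => decide (x.2 < order)), 0 ≤ ce.2 ∧ ce.2 < ((List.replicate order.toNat (0:Int)).length : Int) := by
    intro ce hce
    have h1 : ce.2 < order := by simpa using (List.mem_filter.mp hce).2
    have h2 : ce ∈ cel1 := (PySem.List.mem_sorted _ _ _ _).mp (List.mem_of_mem_filter hce)
    refine ⟨hall ce h2, ?_⟩
    rw [hrep]
    omega
  have hmemB : ∀ ce ∈ cel1.filter (fun ce => decide (0 ≤ ce.2 ∧ ce.2 < order)),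
      0 ≤ ce.2 ∧ ce.2 < ((List.replicate order.toNat (0:Int)).length : Int) := by
    intro ce hce
    have h1 : 0 ≤ ce.2 ∧ ce.2 < order := by simpa using (List.mem_filter.mp hce).2
    refine ⟨h1.1, ?_⟩
    rw [hrep]
    omega
  obtain ⟨lenA, DA⟩ := pvInit _ _ hmemA
  obtain ⟨lenB, DB⟩ := pvInit _ _ hmemB
  have hfeq : cel1.filter (fun ce => decide (0 ≤ ce.2 ∧ ce.2 < order))
      = cel1.filter (fun x => decide (x.2 < order)) := by
    apply List.filter_congr
    intro x hx
    have := hall x hx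
    simp [this]
  constructor
  · apply pv_ext_getD _ _ (by rw [lenA, lenB])
    intro k hk
    rw [DA k, DB k, hfeq]
    congr 1
    exact pvSL_perm ((PySem.List.sorted_perm cel1 _ false).filter _) k
  · rw [lenB, hrep]

lemma pvPowB_char (order : Int) (h0 : 0 < order) (g : PowerSeries ℤ) (nn : Int) (hnn : 0 < nn) :
    pvPowB order (pvT order.toNat g) nn = pvT order.toNat (g ^ nn.toNat) := by
  rw [pvPowB, pvPowLoop_char order h0 (nn-1).toNat (nn-1) rfl g g]
  congr 1
  rw [← pow_succ']
  congr 1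
  omega

theorem pvMain (cel1 : List (Int × Int)) (ex1 : Int) (cel2 : List (Int × Int)) (ex2 : Int)
    (order : Int) (h0 : 0 < order) (hex1 : 0 < ex1) (hall1 : ∀ ce ∈ cel1, 0 ≤ ce.2)
    (hall2 : 0 < ex2 → ∀ ce ∈ cel2, 0 ≤ ce.2) :
    power_productl cel1 ex1 cel2 ex2 order = power_productl_alt cel1 ex1 cel2 ex2 order := by
  obtain ⟨hinit, hlenI⟩ := pvInit_eq cel1 order h0 hall1
  set N := order.toNat with hN
  set I := cel1.foldl (fun acc ce =>
      if 0 ≤ ce.2 ∧ ce.2 < order then pvSetI acc ce.2 (pvGetI acc ce.2 + ce.1) else acc)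
      (PySem.List.pyRepeat [0] order) with hI
  have hIT : I = pvT N (pvPhi I) := (pvT_phi N I hlenI).symm
  set q1 := pvPhi (pvQ N cel1) with hq1
  set n1 := (ex1 - 1).toNat with hn1
  have hsort1 : (((PySem.List.sorted cel1 (fun x => x.2) false).filter
      (fun x => decide (x.2 < order)))).Pairwise (fun a b => a.2 ≤ b.2) :=
    List.Pairwise.filter _ (PySem.List.sorted_pairwise cel1 _)
  have hall1' : ∀ ce ∈ ((PySem.List.sorted cel1 (fun x => x.2) false).filter
      (fun x => decide (x.2 < order))), 0 ≤ ce.2 ∧ ce.2 < order :=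
    fun ce hce => ⟨hall1 ce ((PySem.List.mem_sorted _ _ _ _).mp (List.mem_of_mem_filter hce)),
      by simpa using (List.mem_filter.mp hce).2⟩
  have hstage1 : pvLoopA ((PySem.List.sorted cel1 (fun x => x.2) false).filter
      (fun x => decide (x.2 < order))) order I (ex1 - 1) = pvT N (pvPhi I * q1 ^ n1) := by
    conv_lhs => rw [hIT]
    rw [pvLoopA_char _ order h0 hall1' hsort1 n1 (ex1-1) rfl (pvPhi I),
      pvQ_bridge order h0 cel1 hall1]
  have hQ1T : pvQ N cel1 = pvT N q1 := (pvT_phi N _ (pvQ_len N cel1)).symm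
  have hacc1B : (if 1 < ex1 then
        pvMulB order I (pvPowB order (pvMultiplier order cel1) (ex1 - 1)) else I)
      = pvT N (pvPhi I * q1 ^ n1) := by
    by_cases hx : 1 < ex1
    · rw [if_pos hx, pvMultiplier_char order h0 cel1, hQ1T, pvPowB_char order h0 q1 (ex1-1) (by omega)]
      conv_lhs => rw [hIT]
      exact pvMulB_TT order h0 _ _
    · rw [if_neg hx]
      have hz : n1 = 0 := by omega
      rw [hz, pow_zero, mul_one, ← hIT]
  have hAeq : power_productl cel1 ex1 cel2 ex2 order
      = pvLoopA ((PySem.List.sorted cel2 (fun x => x.2) false).filter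
          (fun x => decide (x.2 < order))) order
        (pvLoopA ((PySem.List.sorted cel1 (fun x => x.2) false).filter
          (fun x => decide (x.2 < order))) order
          (((PySem.List.sorted cel1 (fun x => x.2) false).filter
              (fun x => decide (x.2 < order))).foldl
            (fun acc ce => if ce.2 < order then pvSetI acc ce.2 (pvGetI acc ce.2 + ce.1) else acc)
            (PySem.List.pyRepeat [0] order)) (ex1 - 1)) ex2 := rfl
  have hBeq : power_productl_alt cel1 ex1 cel2 ex2 order
      = (if 0 < ex2 then
          pvMulB order (if 1 < ex1 then
              pvMulB order I (pvPowB order (pvMultiplier order cel1) (ex1 - 1)) else I)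
            (pvPowB order (pvMultiplier order cel2) ex2)
        else (if 1 < ex1 then
          pvMulB order I (pvPowB order (pvMultiplier order cel1) (ex1 - 1)) else I)) := rfl
  rw [hAeq, hinit, hstage1, hBeq, hacc1B]
  by_cases hx2 : 0 < ex2
  · have hsort2 : (((PySem.List.sorted cel2 (fun x => x.2) false).filter
        (fun x => decide (x.2 < order)))).Pairwise (fun a b => a.2 ≤ b.2) :=
      List.Pairwise.filter _ (PySem.List.sorted_pairwise cel2 _)
    have hall2' : ∀ ce ∈ ((PySem.List.sorted cel2 (fun x => x.2) false).filter
        (fun x => decide (x.2 < order))), 0 ≤ ce.2 ∧ ce.2 < order :=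
      fun ce hce => ⟨hall2 hx2 ce ((PySem.List.mem_sorted _ _ _ _).mp (List.mem_of_mem_filter hce)),
        by simpa using (List.mem_filter.mp hce).2⟩
    have hQ2T : pvQ N cel2 = pvT N (pvPhi (pvQ N cel2)) := (pvT_phi N _ (pvQ_len N cel2)).symm
    rw [if_pos hx2,
      pvLoopA_char _ order h0 hall2' hsort2 ex2.toNat ex2 rfl (pvPhi I * q1 ^ n1),
      pvQ_bridge order h0 cel2 (hall2 hx2),
      pvMultiplier_char order h0 cel2]
    conv_rhs => rw [hQ2T]
    rw [pvPowB_char order h0 _ ex2 hx2, pvMulB_TT order h0]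
  · rw [if_neg hx2, pvLoopA, if_neg (by omega)]

-- ===== VERDICT (by name: the statement is the Claim_ definition above) =====
theorem power_productl_spec : Claim_equal_power_productl := by
  intro cel1 ex1 cel2 ex2 order hdom hpre
  obtain ⟨h0, hex1, hall1, hall2⟩ := hpre
  unfold Spec_power_productl
  exact pvMain cel1 ex1 cel2 ex2 order h0 hex1 hall1 hall2
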